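-- pv_equiv track=rewrite | github.com/Username5926/Leadership_Influence.v2 | app.py | _get_strat_circle_targets
-- ===== SOURCE A (Python) =====
-- def _get_strat_circle_targets(strat_vals):
--     pull_vals = [(i, strat_vals[i]) for i in range(3)]
--     push_vals = [(i, strat_vals[i]) for i in range(4, 9)]
--     pull_max = max(v for _, v in pull_vals)
--     push_max = max(v for _, v in push_vals)
--     pull_targets = [i for i, v in pull_vals if v == pull_max]
--     push_targets = [i for i, v in push_vals if v == push_max]
--     if len(pull_targets) == 3:
--         pull_targets = []
--     if len(push_targets) >= 3:
--         push_targets = []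
--     return sorted(pull_targets + push_targets)
-- ===== SOURCE B (Python) =====
-- def _get_strat_circle_targets(strat_vals):
--     def group(idxs, clear_at):
--         best = None
--         ties = []
--         for i in idxs:
--             v = strat_vals[i]
--             if best is None or v > best:
--                 best = v
--                 ties = [i]
--             elif v == best:
--                 ties.append(i)
--         return [] if len(ties) >= clear_at else ties
--     return sorted(group(range(3), 3) + group(range(4, 9), 3))
-- ===== Notes on version B (the rewrite author's own statement) =====
-- stated objective: simpler
-- what changed: Replaces the per-group two-pass structure (build index/value pairs, take max, then filter for equality) and its duplicated clear-logic with one shared helper that scans each index range once, tracking the running maximum and the list of tying indices, clearing when the tie count reaches 3.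
import Mathlib
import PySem

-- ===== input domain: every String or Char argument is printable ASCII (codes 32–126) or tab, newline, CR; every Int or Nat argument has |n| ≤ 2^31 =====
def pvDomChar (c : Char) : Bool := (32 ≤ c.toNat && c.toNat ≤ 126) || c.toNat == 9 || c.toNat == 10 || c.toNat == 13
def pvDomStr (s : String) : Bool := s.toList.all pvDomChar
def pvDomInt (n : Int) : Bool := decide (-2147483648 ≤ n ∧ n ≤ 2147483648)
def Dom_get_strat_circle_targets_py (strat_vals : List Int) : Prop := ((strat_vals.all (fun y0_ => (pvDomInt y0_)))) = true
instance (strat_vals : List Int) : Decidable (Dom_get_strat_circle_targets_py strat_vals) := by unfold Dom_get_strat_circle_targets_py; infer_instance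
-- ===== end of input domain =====

-- B replaces A's per-group two-pass (max, then equality filter) with one shared
-- argmax-with-ties scan per index range; objective: simpler (no speed claim).
set_option maxRecDepth 8000


-- ===== PORT A =====
-- Python max(...) of a list; raises on empty in Python, but here it is only
-- applied to the nonempty literal ranges range(3) and range(4,9).
def pyMaxA (xs : List Int) : Int :=
  match xs with
  | [] => 0
  | h :: t => t.foldl max h

-- strat_vals[i]: exact for 0 ≤ i < len, guaranteed by Pre_ (length ≥ 9).
def get_strat_circle_targets_py (strat_vals : List Int) : List Int :=
  let pull_vals := (PySem.List.pyRange 0 3 1).map (fun i => (i, PySem.List.pyGetD strat_vals i 0))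
  let push_vals := (PySem.List.pyRange 4 9 1).map (fun i => (i, PySem.List.pyGetD strat_vals i 0))
  let pull_max := pyMaxA (pull_vals.map (fun p => p.2))
  let push_max := pyMaxA (push_vals.map (fun p => p.2))
  let pull_targets := (pull_vals.filter (fun p => p.2 == pull_max)).map (fun p => p.1)
  let push_targets := (push_vals.filter (fun p => p.2 == push_max)).map (fun p => p.1)
  let pull_targets := if pull_targets.length = 3 then [] else pull_targets
  let push_targets := if push_targets.length ≥ 3 then [] else push_targets
  PySem.List.sorted (pull_targets ++ push_targets) (fun x => x) false

-- ===== PORT B =====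
-- One step of B's loop body: reset the tie list on a strictly greater value, append on a tie.
def altStep (strat_vals : List Int) (acc : Option Int × List Int) (i : Int) : Option Int × List Int :=
  let v := PySem.List.pyGetD strat_vals i 0
  match acc.1 with
  | none => (some v, [i])
  | some b => if b < v then (some v, [i]) else if v == b then (some b, acc.2 ++ [i]) else acc

def altGroup (strat_vals : List Int) (idxs : List Int) (clearAt : Nat) : List Int :=
  let st := idxs.foldl (altStep strat_vals) (none, [])
  if clearAt ≤ st.2.length then [] else st.2

def get_strat_circle_targets_py_alt (strat_vals : List Int) : List Int :=
  PySem.List.sorted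
    (altGroup strat_vals (PySem.List.pyRange 0 3 1) 3 ++ altGroup strat_vals (PySem.List.pyRange 4 9 1) 3)
    (fun x => x) false

-- ===== PRECONDITION & SPEC =====
-- A indexes strat_vals[0..2] and strat_vals[4..8]; on shorter lists it raises IndexError.
def Pre_get_strat_circle_targets_py (strat_vals : List Int) : Prop := 9 ≤ strat_vals.length
instance (strat_vals : List Int) : Decidable (Pre_get_strat_circle_targets_py strat_vals) := by unfold Pre_get_strat_circle_targets_py; infer_instance
def pvWitness_get_strat_circle_targets_py : List Int := [1, 2, 3, 4, 5, 6, 7, 8, 9]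
def Spec_get_strat_circle_targets_py (strat_vals : List Int) (out : List Int) : Prop := out = get_strat_circle_targets_py_alt strat_vals
instance (strat_vals : List Int) (out : List Int) : Decidable (Spec_get_strat_circle_targets_py strat_vals out) := by unfold Spec_get_strat_circle_targets_py; infer_instance

-- ===== CLAIM (what is proved, stated in full; the proofs are below) =====
def Claim_equal_get_strat_circle_targets_py : Prop := ∀ (strat_vals : List Int), Dom_get_strat_circle_targets_py strat_vals → Pre_get_strat_circle_targets_py strat_vals → Spec_get_strat_circle_targets_py strat_vals (get_strat_circle_targets_py strat_vals)

-- ===== LEMMAS AND PROOFS =====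

-- B's step, abstracted over the value function (altStep sv = gStep (value lookup))
def gStep (f : Int → Int) (acc : Option Int × List Int) (i : Int) : Option Int × List Int :=
  match acc.1 with
  | none => (some (f i), [i])
  | some b => if b < f i then (some (f i), [i]) else if f i == b then (some b, acc.2 ++ [i]) else acc

theorem altStep_eq (sv : List Int) : altStep sv = gStep (fun i => PySem.List.pyGetD sv i 0) := by
  funext acc i
  cases acc with
  | mk o ts => cases o <;> rfl

theorem le_foldl_max (f : Int → Int) : ∀ (idxs : List Int) (b : Int),
    b ≤ idxs.foldl (fun a i => max a (f i)) b := by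
  intro idxs
  induction idxs with
  | nil => intro b; simp
  | cons i t ih =>
    intro b
    calc b ≤ max b (f i) := le_max_left _ _
      _ ≤ _ := ih (max b (f i))

-- B's fold with a live best value computes the running max and all tying indices.
theorem gFold (f : Int → Int) : ∀ (t : List Int) (b : Int) (ts : List Int),
    t.foldl (gStep f) (some b, ts) =
      (some (t.foldl (fun a i => max a (f i)) b),
       (if b < t.foldl (fun a i => max a (f i)) b then [] else ts)
         ++ t.filter (fun i => f i == t.foldl (fun a i => max a (f i)) b)) := by
  intro t
  induction t with
  | nil => intro b ts; simp
  | cons i t ih =>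
    intro b ts
    simp only [List.foldl_cons]
    by_cases h1 : b < f i
    · have hm : max b (f i) = f i := by omega
      have hle : f i ≤ t.foldl (fun a i => max a (f i)) (f i) := le_foldl_max f t (f i)
      rw [show gStep f (some b, ts) i = (some (f i), [i]) from by simp [gStep, h1]]
      rw [ih (f i) [i]]
      simp only [hm]
      have hb : b < t.foldl (fun a i => max a (f i)) (f i) := by omega
      rw [if_pos hb, List.filter_cons]
      by_cases h2 : f i = t.foldl (fun a i => max a (f i)) (f i)
      · have hnl : ¬ f i < t.foldl (fun a i => max a (f i)) (f i) := by omega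
        rw [if_neg hnl, if_pos (by simpa using h2)]
        simp
      · have hlt : f i < t.foldl (fun a i => max a (f i)) (f i) := by omega
        rw [if_pos hlt, if_neg (by simpa using h2)]
    · by_cases h2 : f i = b
      · have hm : max b (f i) = b := by omega
        have hle : b ≤ t.foldl (fun a i => max a (f i)) b := le_foldl_max f t b
        rw [show gStep f (some b, ts) i = (some b, ts ++ [i]) from by simp [gStep, h2]]
        rw [ih b (ts ++ [i])]
        simp only [hm]
        rw [List.filter_cons]
        by_cases h3 : b < t.foldl (fun a i => max a (f i)) b
        · have hne : ¬ f i = t.foldl (fun a i => max a (f i)) b := by omega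
          rw [if_pos h3, if_pos h3, if_neg (by simpa using hne)]
        · have heq : f i = t.foldl (fun a i => max a (f i)) b := by omega
          rw [if_neg h3, if_neg h3, if_pos (by simpa using heq)]
          simp
      · have hm : max b (f i) = b := by omega
        have hle : b ≤ t.foldl (fun a i => max a (f i)) b := le_foldl_max f t b
        have hfb : f i < b := by omega
        rw [show gStep f (some b, ts) i = (some b, ts) from by simp [gStep, h1, h2]]
        rw [ih b ts]
        simp only [hm]
        rw [List.filter_cons]
        have hne : ¬ f i = t.foldl (fun a i => max a (f i)) b := by omega
        have hbe : (f i == t.foldl (fun a i => max a (f i)) b) = false := by simpa using hne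
        simp [hbe]

-- the ties collected over a nonempty index list are exactly the indices attaining the max
theorem gGroup_ties (f : Int → ℤ) (i0 : Int) (rest : List Int) :
    ((i0 :: rest).foldl (gStep f) (none, [])).2 =
      (i0 :: rest).filter (fun i => f i == rest.foldl (fun a i => max a (f i)) (f i0)) := by
  have h0 : (i0 :: rest).foldl (gStep f) (none, []) = rest.foldl (gStep f) (some (f i0), [i0]) := by
    simp [gStep]
  rw [h0, gFold f rest (f i0) [i0], List.filter_cons]
  have hle : f i0 ≤ rest.foldl (fun a i => max a (f i)) (f i0) := le_foldl_max f rest (f i0)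
  dsimp only
  by_cases h : f i0 < rest.foldl (fun a i => max a (f i)) (f i0)
  · have hne : ¬ f i0 = rest.foldl (fun a i => max a (f i)) (f i0) := by omega
    rw [if_pos h, if_neg (by simpa using hne)]
    simp
  · have he : f i0 = rest.foldl (fun a i => max a (f i)) (f i0) := by omega
    rw [if_neg h, if_pos (by simpa using he)]
    simp

-- A's pair pipeline (map to pairs, filter on the value, project the index) is an index filter
theorem pairFilter (f : Int → Int) (M : Int) (l : List Int) :
    ((l.map (fun i => (i, f i))).filter (fun p => p.2 == M)).map (fun p => p.1) =
      l.filter (fun i => f i == M) := by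
  induction l with
  | nil => rfl
  | cons x t ih => by_cases h : f x = M <;> simp [h, ih]

-- A's max over the projected values is the seeded running max
theorem pairMax (f : Int → Int) (i0 : Int) (rest : List Int) :
    pyMaxA (((i0 :: rest).map (fun i => (i, f i))).map (fun p => p.2)) =
      rest.foldl (fun a i => max a (f i)) (f i0) := by
  have : ((i0 :: rest).map (fun i => (i, f i))).map (fun p => p.2) = (i0 :: rest).map f := by
    simp
  rw [this]
  simp [pyMaxA, List.foldl_map]

-- per-group agreement, in the shape the main proof uses
theorem group_eq (sv : List Int) (i0 : Int) (rest : List Int) :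
    ((i0 :: rest).foldl (altStep sv) (none, [])).2 =
      (((i0 :: rest).map (fun i => (i, PySem.List.pyGetD sv i 0))).filter
          (fun p => p.2 == pyMaxA (((i0 :: rest).map (fun i => (i, PySem.List.pyGetD sv i 0))).map (fun p => p.2)))).map (fun p => p.1) := by
  rw [altStep_eq, pairMax (fun i => PySem.List.pyGetD sv i 0) i0 rest,
      pairFilter (fun i => PySem.List.pyGetD sv i 0) _ (i0 :: rest),
      gGroup_ties (fun i => PySem.List.pyGetD sv i 0) i0 rest]

-- ===== VERDICT (by name: the statement is the Claim_ definition above) =====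
theorem get_strat_circle_targets_py_spec : Claim_equal_get_strat_circle_targets_py := by
  intro sv _ _
  unfold Spec_get_strat_circle_targets_py
  have hr1 : PySem.List.pyRange 0 3 1 = [0, 1, 2] := by decide
  have hr2 : PySem.List.pyRange 4 9 1 = [4, 5, 6, 7, 8] := by decide
  simp only [get_strat_circle_targets_py, get_strat_circle_targets_py_alt, altGroup, hr1, hr2]
  rw [show ([0, 1, 2] : List Int) = 0 :: [1, 2] from rfl,
      show ([4, 5, 6, 7, 8] : List Int) = 4 :: [5, 6, 7, 8] from rfl,
      group_eq sv 0 [1, 2], group_eq sv 4 [5, 6, 7, 8]]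
  congr 1
  have hl1 : ((((0 :: [1, 2] : List Int).map (fun i => (i, PySem.List.pyGetD sv i 0))).filter
      (fun p => p.2 == pyMaxA (((0 :: [1, 2] : List Int).map (fun i => (i, PySem.List.pyGetD sv i 0))).map (fun p => p.2)))).map (fun p => p.1)).length ≤ 3 := by
    have h := List.length_filter_le
        (fun p : Int × Int => p.2 == pyMaxA (((0 :: [1, 2] : List Int).map (fun i => (i, PySem.List.pyGetD sv i 0))).map (fun p => p.2)))
        ((0 :: [1, 2] : List Int).map (fun i => (i, PySem.List.pyGetD sv i 0)))
    simp only [List.length_map] at h ⊢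
    simpa using h
  congr 1
  split_ifs <;> first | rfl | omega
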